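-- pv_equiv track=rewrite | github.com/hso8706/TIL-SAF | example_algorithm/Day04_python_workshop_03.py | dict_list_sum
-- ===== SOURCE A (Python) =====
-- def dict_list_sum(dict_list):
--     sum_age = 0
--     dict_age = {}
--     for dict in dict_list:
--         dict_age[dict.get('name')] = dict.get('age')
--     for i in dict_age.values():
--         sum_age += i
--     return sum_age
-- ===== SOURCE B (Python) =====
-- def dict_list_sum(dict_list):
--     seen = set()
--     sum_age = 0
--     for d in reversed(dict_list):
--         name = d.get('name')
--         if name not in seen:
--             seen.add(name)
--             sum_age += d.get('age')
--     return sum_age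
-- ===== Notes on version B (the rewrite author's own statement) =====
-- stated objective: alternative
-- what changed: Single reverse scan with a seen-set of names (last-wins dedup) replaces building a full name->age dict and then summing its values in a second pass.
import Mathlib
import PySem

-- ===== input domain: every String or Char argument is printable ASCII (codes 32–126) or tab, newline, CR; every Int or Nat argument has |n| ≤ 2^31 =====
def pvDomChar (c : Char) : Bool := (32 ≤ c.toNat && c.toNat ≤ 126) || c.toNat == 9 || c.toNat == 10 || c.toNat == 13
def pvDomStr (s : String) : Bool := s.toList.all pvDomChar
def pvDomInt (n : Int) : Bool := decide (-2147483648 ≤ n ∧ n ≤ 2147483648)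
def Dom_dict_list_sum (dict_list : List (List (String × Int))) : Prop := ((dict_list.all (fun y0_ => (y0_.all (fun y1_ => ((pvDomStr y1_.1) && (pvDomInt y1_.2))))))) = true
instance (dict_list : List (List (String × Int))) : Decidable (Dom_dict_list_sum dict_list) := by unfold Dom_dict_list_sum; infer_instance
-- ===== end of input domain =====

-- B replaces A's two passes (build a name→age dict, then sum its values) by one reverse scan
-- keeping only a seen-set of names and a running sum; same O(n) cost, exact value on Pre_.

-- oadd models 'acc += x' where x may be None: none = TypeError (those inputs are excluded by Pre_)
def oadd (a b : Option Int) : Option Int :=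
  match a, b with
  | some x, some y => some (x + y)
  | _, _ => none

-- ===== PORT A =====
def dict_list_sum (dict_list : List (List (String × Int))) : Int :=
  (((dict_list.foldl
      (fun d dct => d.insert ((PySem.Dict.mk dct).get? "name") ((PySem.Dict.mk dct).get? "age"))
      (PySem.Dict.empty : PySem.Dict (Option Int) (Option Int))).values.foldl
    oadd (some 0)).getD 0)

-- ===== PORT B =====
-- the loop body of B: skip an already-seen name, else mark it seen and add its age
def bstep (st : PySem.Set (Option Int) × Option Int) (dct : List (String × Int)) :
    PySem.Set (Option Int) × Option Int :=
  if PySem.Set.contains st.1 ((PySem.Dict.mk dct).get? "name") then st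
  else (PySem.Set.add st.1 ((PySem.Dict.mk dct).get? "name"),
        oadd st.2 ((PySem.Dict.mk dct).get? "age"))

def dict_list_sum_alt (dict_list : List (List (String × Int))) : Int :=
  ((dict_list.reverse.foldl bstep ((PySem.Set.empty : PySem.Set (Option Int)), (some 0 : Option Int))).2).getD 0

-- ===== PRECONDITION & SPEC =====
-- Pre_ excludes exactly the inputs on which Python A raises TypeError: some dict that is the
-- last occurrence of its 'name' has no 'age' key, so a None ends up in dict_age.values.
def Pre_dict_list_sum (dict_list : List (List (String × Int))) : Prop :=
  ∀ i : Fin dict_list.length,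
    ((PySem.Dict.mk dict_list[i]).get? "age").isSome = true ∨
    ∃ j : Fin dict_list.length, (i : Nat) < (j : Nat) ∧
      (PySem.Dict.mk dict_list[j]).get? "name" = (PySem.Dict.mk dict_list[i]).get? "name"
instance (dict_list : List (List (String × Int))) : Decidable (Pre_dict_list_sum dict_list) := by
  unfold Pre_dict_list_sum; infer_instance

def pvWitness_dict_list_sum : (List (List (String × Int))) :=
  [[("name", 1), ("age", 20)], [("name", 2)], [("name", 2), ("age", 30)]]

def Spec_dict_list_sum (dict_list : List (List (String × Int))) (out : Int) : Prop := out = dict_list_sum_alt dict_list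
instance (dict_list : List (List (String × Int))) (out : Int) : Decidable (Spec_dict_list_sum dict_list out) := by unfold Spec_dict_list_sum; infer_instance

-- ===== CLAIM (what is proved, stated in full; the proofs are below) =====
def Claim_equal_dict_list_sum : Prop := ∀ (dict_list : List (List (String × Int))), Dom_dict_list_sum dict_list → Pre_dict_list_sum dict_list → Spec_dict_list_sum dict_list (dict_list_sum dict_list)

-- ===== LEMMAS AND PROOFS =====

theorem oadd_comm (a b : Option Int) : oadd a b = oadd b a := by
  cases a <;> cases b <;> simp [oadd] <;> ring

theorem oadd_assoc (a b c : Option Int) : oadd (oadd a b) c = oadd a (oadd b c) := by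
  cases a <;> cases b <;> cases c <;> simp [oadd] <;> ring

theorem oadd_zero_left (a : Option Int) : oadd (some 0) a = a := by
  cases a <;> simp [oadd]

theorem oadd_zero_right (a : Option Int) : oadd a (some 0) = a := by
  rw [oadd_comm]; exact oadd_zero_left a

def osum (l : List (Option Int)) : Option Int := l.foldr oadd (some 0)

theorem osum_cons (a : Option Int) (l : List (Option Int)) : osum (a :: l) = oadd a (osum l) := rfl

theorem foldl_oadd (l : List (Option Int)) (t : Option Int) :
    l.foldl oadd t = oadd t (osum l) := by
  induction l generalizing t with
  | nil => exact (oadd_zero_right t).symm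
  | cons a l ih => simp only [List.foldl_cons, ih, osum_cons, ← oadd_assoc]

-- sum of the values of the entries whose key is not in the seen-set S
def F (S : PySem.Set (Option Int)) (items : List (Option Int × Option Int)) : Option Int :=
  osum ((items.filter (fun p => !(PySem.Set.contains S p.1))).map (·.2))

theorem F_nil (S : PySem.Set (Option Int)) : F S [] = some 0 := rfl

theorem F_cons (S : PySem.Set (Option Int)) (p : Option Int × Option Int)
    (l : List (Option Int × Option Int)) :
    F S (p :: l) = if p.1 ∈ S then F S l else oadd p.2 (F S l) := by
  by_cases h : p.1 ∈ S <;> simp [F, h, osum_cons]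

theorem F_append (S : PySem.Set (Option Int)) (l₁ l₂ : List (Option Int × Option Int)) :
    F S (l₁ ++ l₂) = oadd (F S l₁) (F S l₂) := by
  induction l₁ with
  | nil => rw [List.nil_append, F_nil, oadd_zero_left]
  | cons p l ih =>
    rw [List.cons_append, F_cons, F_cons, ih]
    split_ifs with h
    · rfl
    · rw [← oadd_assoc]

-- entries with keys ≠ k are indifferent to adding k to the seen-set
theorem F_add_of_no_key (S : PySem.Set (Option Int)) (k : Option Int)
    (l : List (Option Int × Option Int)) (h : ∀ p ∈ l, p.1 ≠ k) :
    F (PySem.Set.add S k) l = F S l := by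
  induction l with
  | nil => rw [F_nil, F_nil]
  | cons p l ih =>
    have hp : p.1 ≠ k := h p List.mem_cons_self
    have ihl := ih (fun q hq => h q (List.mem_cons_of_mem _ hq))
    rw [F_cons, F_cons, ihl]
    have hmem : p.1 ∈ PySem.Set.add S k ↔ p.1 ∈ S := by
      rw [PySem.Set.mem_add]; simp [hp]
    simp only [hmem]

theorem map_repl_eq_self (k v : Option Int) (l : List (Option Int × Option Int))
    (h : ∀ p ∈ l, p.1 ≠ k) :
    l.map (fun p => if p.1 == k then (k, v) else p) = l := by
  induction l with
  | nil => rfl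
  | cons p l ih =>
    have hp : p.1 ≠ k := h p List.mem_cons_self
    have ihl := ih (fun q hq => h q (List.mem_cons_of_mem _ hq))
    rw [List.map_cons, ihl, if_neg (by simpa using hp)]

-- key lemma, replace case: overwriting the unique k-entry's value by v
theorem F_repl (S : PySem.Set (Option Int)) (k v : Option Int)
    (l : List (Option Int × Option Int)) (hS : k ∉ S)
    (hnd : (l.map (·.1)).Nodup) (hk : k ∈ l.map (·.1)) :
    F S (l.map (fun p => if p.1 == k then (k, v) else p)) = oadd v (F (PySem.Set.add S k) l) := by
  induction l with
  | nil => simp at hk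
  | cons p l ih =>
    simp only [List.map_cons, List.nodup_cons] at hnd
    have hk' : k = p.1 ∨ k ∈ List.map (fun x => x.1) l := by simpa using hk
    rcases hk' with hpk | hkl
    · have hnok : ∀ q ∈ l, q.1 ≠ k := by
        intro q hq hqk
        exact hnd.1 (hpk ▸ hqk ▸ List.mem_map_of_mem hq)
      rw [List.map_cons, if_pos (by simpa using hpk.symm),
          map_repl_eq_self k v l hnok, F_cons, F_cons,
          F_add_of_no_key S k l hnok]
      have h1 : p.1 ∈ PySem.Set.add S k := by rw [PySem.Set.mem_add]; right; exact hpk.symm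
      rw [if_neg (show (k, v).1 ∈ S → False from hS), if_pos h1]
    · have hpk : p.1 ≠ k := fun h => hnd.1 (h ▸ hkl)
      rw [List.map_cons, if_neg (by simpa using hpk), F_cons, F_cons, ih hnd.2 hkl]
      have hmem : p.1 ∈ PySem.Set.add S k ↔ p.1 ∈ S := by
        rw [PySem.Set.mem_add]; simp [hpk]
      simp only [hmem]
      split_ifs with h
      · rfl
      · rw [← oadd_assoc, oadd_comm p.2 v, oadd_assoc]

def buildDict (l : List (List (String × Int))) : PySem.Dict (Option Int) (Option Int) :=
  l.foldl
    (fun d dct => d.insert ((PySem.Dict.mk dct).get? "name") ((PySem.Dict.mk dct).get? "age"))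
    PySem.Dict.empty

theorem nodup_keys_buildDict (l : List (List (String × Int))) : (buildDict l).keys.Nodup := by
  unfold buildDict
  exact PySem.Dict.nodup_keys_foldl_insert_key l
    (fun dct => (PySem.Dict.mk dct).get? "name")
    (fun _ dct => (PySem.Dict.mk dct).get? "age") PySem.Dict.empty
    PySem.Dict.nodup_keys_empty

theorem F_insert_of_mem (S : PySem.Set (Option Int)) (D : PySem.Dict (Option Int) (Option Int))
    (k v : Option Int) (hS : k ∈ S) :
    F S (D.insert k v).items = F S D.items := by
  rw [PySem.Dict.items_insert]
  split_ifs with hc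
  · induction D.items with
    | nil => rfl
    | cons p l ih =>
      by_cases hpk : p.1 = k
      · rw [List.map_cons, if_pos (by simpa using hpk), F_cons, F_cons, ih,
            if_pos (show (k, v).1 ∈ S from hS), if_pos (show p.1 ∈ S from hpk ▸ hS)]
      · rw [List.map_cons, if_neg (by simpa using hpk), F_cons, F_cons, ih]
  · rw [F_append, F_cons, F_nil, if_pos (show (k, v).1 ∈ S from hS), oadd_zero_right]

theorem F_insert_of_not_mem (S : PySem.Set (Option Int)) (D : PySem.Dict (Option Int) (Option Int))
    (k v : Option Int) (hS : k ∉ S) (hnd : D.keys.Nodup) :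
    F S (D.insert k v).items = oadd v (F (PySem.Set.add S k) D.items) := by
  rw [PySem.Dict.items_insert]
  split_ifs with hc
  · exact F_repl S k v D.items hS
      (by simpa only [PySem.Dict.keys] using hnd)
      (by simpa only [PySem.Dict.keys] using (PySem.Dict.contains_iff_mem_keys D k).mp hc)
  · have hnok : ∀ p ∈ D.items, p.1 ≠ k := by
      intro p hp hpk
      have hm : k ∈ D.keys := by
        simp only [PySem.Dict.keys]
        exact hpk ▸ List.mem_map_of_mem (f := (·.1)) hp
      simp [(PySem.Dict.contains_iff_mem_keys D k).mpr hm] at hc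
    rw [F_append, F_cons, F_nil, if_neg (show (k, v).1 ∉ S from hS),
        F_add_of_no_key S k D.items hnok, oadd_zero_right, oadd_comm]

-- main loop invariant: B's reverse scan from state (S, t) yields t + (sum of the values of
-- A's dict over the keys not yet seen)
theorem main_loop (l : List (List (String × Int))) (S : PySem.Set (Option Int)) (t : Option Int) :
    (l.reverse.foldl bstep (S, t)).2 = oadd t (F S (buildDict l).items) := by
  induction l using List.reverseRecOn generalizing S t with
  | nil =>
    rw [show buildDict [] = PySem.Dict.empty from rfl,
        show (PySem.Dict.empty : PySem.Dict (Option Int) (Option Int)).items = [] from rfl,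
        F_nil, oadd_zero_right]
    rfl
  | append_singleton l d ih =>
    have hbd : buildDict (l ++ [d]) =
        (buildDict l).insert ((PySem.Dict.mk d).get? "name") ((PySem.Dict.mk d).get? "age") := by
      simp [buildDict, List.foldl_append]
    rw [List.reverse_append, List.reverse_singleton, List.singleton_append, List.foldl_cons, hbd]
    by_cases h : (PySem.Dict.mk d).get? "name" ∈ S
    · rw [show bstep (S, t) d = (S, t) by simp [bstep, h]]
      rw [ih, F_insert_of_mem _ _ _ _ h]
    · rw [show bstep (S, t) d = (PySem.Set.add S ((PySem.Dict.mk d).get? "name"),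
          oadd t ((PySem.Dict.mk d).get? "age")) by
        simp [bstep, h]]
      rw [ih, F_insert_of_not_mem _ _ _ _ h (nodup_keys_buildDict l),
        ← oadd_assoc, oadd_comm t, oadd_assoc]

theorem F_empty_eq_values (D : PySem.Dict (Option Int) (Option Int)) :
    F PySem.Set.empty D.items = osum D.values := by
  unfold F
  have hall : ∀ p ∈ D.items, (!(PySem.Set.contains PySem.Set.empty p.1)) = true := fun p _ => rfl
  rw [List.filter_eq_self.mpr hall]
  rfl

-- ===== VERDICT (by name: the statement is the Claim_ definition above) =====
theorem dict_list_sum_spec : Claim_equal_dict_list_sum := by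
  intro l _ _
  unfold Spec_dict_list_sum dict_list_sum dict_list_sum_alt
  rw [main_loop l PySem.Set.empty (some 0), oadd_zero_left, F_empty_eq_values,
      show (buildDict l) = l.foldl
        (fun d dct => d.insert ((PySem.Dict.mk dct).get? "name") ((PySem.Dict.mk dct).get? "age"))
        PySem.Dict.empty from rfl,
      foldl_oadd, oadd_zero_left]
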